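-- pv_equiv track=rewrite | github.com/mindartyr/iRnWs | search_backend/scoring_model/relevance_model.py | get_features_mapping
-- ===== SOURCE A (Python) =====
-- def get_features_mapping(amount):
--     output = []
--     i = 1
--     while len(output) < amount:
--         if i % 5 != 0 and i % 5 != 4:
--             output.append(i)
--         i += 1
--     return output
-- ===== SOURCE B (Python) =====
-- def get_features_mapping(amount):
--     # k-th kept value (i % 5 in {1,2,3}) in closed form: 3 per block of 5.
--     return [5 * (k // 3) + (k % 3) + 1 for k in range(amount)]
-- ===== Notes on version B (the rewrite author's own statement) =====
-- stated objective: simpler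
-- what changed: Replaces the scan-and-skip while-loop that grows a list with a one-line closed form computing the k-th kept value directly from its index over range(amount).
import Mathlib
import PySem

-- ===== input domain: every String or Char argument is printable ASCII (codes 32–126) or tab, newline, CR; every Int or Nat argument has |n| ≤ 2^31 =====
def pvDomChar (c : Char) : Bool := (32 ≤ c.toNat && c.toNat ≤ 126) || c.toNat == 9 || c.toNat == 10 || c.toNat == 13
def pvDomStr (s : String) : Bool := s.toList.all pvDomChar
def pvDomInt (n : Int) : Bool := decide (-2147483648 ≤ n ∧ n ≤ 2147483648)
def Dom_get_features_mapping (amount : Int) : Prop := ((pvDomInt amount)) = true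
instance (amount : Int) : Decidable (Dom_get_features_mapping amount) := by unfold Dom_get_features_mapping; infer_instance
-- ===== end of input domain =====

-- B replaces A's scan-and-skip while-loop with a closed form for the k-th kept value (simpler).

-- ===== PORT A =====
-- A's while-loop, step for step; the fuel argument only totalizes the recursion
-- (3*amount+4 steps always suffice: each of the `amount` appends costs at most 3 iterations)
def get_features_mapping_loop (fuel : Nat) (amount : Int) (output : List Int) (i : Int) : List Int :=
  match fuel with
  | 0 => output
  | fuel + 1 =>
    if (output.length : Int) < amount then
      if PySem.Int.mod i 5 ≠ 0 ∧ PySem.Int.mod i 5 ≠ 4 then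
        get_features_mapping_loop fuel amount (output ++ [i]) (i + 1)
      else
        get_features_mapping_loop fuel amount output (i + 1)
    else
      output

def get_features_mapping (amount : Int) : List Int :=
  get_features_mapping_loop (3 * amount.toNat + 4) amount [] 1

-- ===== PORT B =====
def get_features_mapping_alt (amount : Int) : List Int :=
  (PySem.List.pyRange 0 amount 1).map
    (fun k => 5 * PySem.Int.floordiv k 3 + PySem.Int.mod k 3 + 1)

-- ===== PRECONDITION & SPEC =====
def Spec_get_features_mapping (amount : Int) (out : List Int) : Prop := out = get_features_mapping_alt amount
instance (amount : Int) (out : List Int) : Decidable (Spec_get_features_mapping amount out) := by unfold Spec_get_features_mapping; infer_instance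

-- ===== CLAIM (what is proved, stated in full; the proofs are below) =====
def Claim_equal_get_features_mapping : Prop := ∀ (amount : Int), Dom_get_features_mapping amount → Spec_get_features_mapping amount (get_features_mapping amount)

-- ===== LEMMAS AND PROOFS =====

-- the closed form of B, over ediv/emod so that omega can reason about it
def pvF (k : Int) : Int := 5 * (k / 3) + k % 3 + 1

lemma pvF_eq (k : Int) :
    5 * PySem.Int.floordiv k 3 + PySem.Int.mod k 3 + 1 = pvF k := by
  rw [PySem.Int.floordiv_eq_ediv_of_pos (show (0:Int) < 3 by omega),
      PySem.Int.mod_eq_emod_of_pos (show (0:Int) < 3 by omega)]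
  rfl

-- loop invariant: i is the next kept value pvF n (n = |output|), or one of the at most
-- two skipped candidates just before it; with enough fuel the loop appends the closed-form tail
lemma loop_eq (fuel : Nat) (amount : Int) (out : List Int) (i : Int)
    (hinv : i = pvF (out.length) ∨
      ((out.length : Int) % 3 = 0 ∧ (i = pvF (out.length) - 1 ∨ i = pvF (out.length) - 2)))
    (hfuel : 3 * (amount - (out.length : Int)) + (pvF (out.length) - i) ≤ (fuel : Int)) :
    get_features_mapping_loop fuel amount out i =
      out ++ (PySem.List.pyRange (out.length) amount 1).map pvF := by
  induction fuel generalizing out i with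
  | zero =>
    rw [get_features_mapping_loop, PySem.List.pyRange_one_eq_nil (by unfold pvF at *; omega)]
    simp
  | succ fuel ih =>
    rw [get_features_mapping_loop]
    by_cases h : (out.length : Int) < amount
    · rw [if_pos h]
      have hmod : PySem.Int.mod i 5 = i % 5 :=
        PySem.Int.mod_eq_emod_of_pos (show (0:Int) < 5 by omega)
      rcases hinv with hi | ⟨hr, hi | hi⟩
      · -- i is the next kept value: append it
        have hkeep : PySem.Int.mod i 5 ≠ 0 ∧ PySem.Int.mod i 5 ≠ 4 := by
          rw [hmod, hi]; unfold pvF; omega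
        rw [if_pos hkeep]
        have hlen : (((out ++ [i]).length : Int)) = (out.length : Int) + 1 := by simp
        have hrec := ih (out ++ [i]) (i + 1)
          (by rw [hlen]; unfold pvF at hi ⊢; omega)
          (by rw [hlen]; push_cast at hfuel ⊢; unfold pvF at hi hfuel ⊢; omega)
        rw [hlen] at hrec
        rw [hrec, PySem.List.pyRange_one_cons h, List.map_cons]
        simp [hi]
      · -- i = pvF n - 1 (≡ 0 mod 5): skipped
        have hskip : ¬(PySem.Int.mod i 5 ≠ 0 ∧ PySem.Int.mod i 5 ≠ 4) := by
          rw [hmod, hi]; unfold pvF; omega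
        rw [if_neg hskip]
        exact ih out (i + 1) (by omega) (by push_cast at hfuel ⊢; omega)
      · -- i = pvF n - 2 (≡ 4 mod 5): skipped
        have hskip : ¬(PySem.Int.mod i 5 ≠ 0 ∧ PySem.Int.mod i 5 ≠ 4) := by
          rw [hmod, hi]; unfold pvF; omega
        rw [if_neg hskip]
        exact ih out (i + 1) (by omega) (by push_cast at hfuel ⊢; omega)
    · rw [if_neg h, PySem.List.pyRange_one_eq_nil (by omega)]
      simp

-- ===== VERDICT (by name: the statement is the Claim_ definition above) =====
theorem get_features_mapping_spec : Claim_equal_get_features_mapping := by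
  intro amount _
  unfold Spec_get_features_mapping get_features_mapping get_features_mapping_alt
  have hbase := loop_eq (3 * amount.toNat + 4) amount [] 1
    (by left; simp [pvF])
    (by simp only [List.length_nil, Nat.cast_zero, sub_zero]; unfold pvF; push_cast; omega)
  simp only [List.length_nil, Nat.cast_zero, List.nil_append] at hbase
  rw [hbase]
  apply List.map_congr_left
  intro k _
  exact (pvF_eq k).symm
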